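-- pv_equiv track=rewrite | github.com/Mario263/Technical-Web-scraper | fixed_scraper.py | _is_valid_article_url
-- ===== SOURCE A (Python) =====
-- def _is_valid_article_url(url: str, domain: str) -> bool:
--     """Check if URL is valid for scraping"""
--
--     if not url or domain not in url:
--         return False
--
--     # Skip unwanted patterns
--     skip_patterns = [
--         'login', 'register', 'signup', 'privacy', 'terms',
--         'contact', 'about', 'search', '.pdf', '.jpg', '.png',
--         'mailto:', 'tel:', '#', 'javascript:'
--     ]
--
--     url_lower = url.lower()
--     for pattern in skip_patterns:
--         if pattern in url_lower:
--             return False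
--
--     return True
-- ===== SOURCE B (Python) =====
-- # B: first-character dispatch table + one left-to-right scan, instead of
-- # one full substring search per pattern.
-- _DISPATCH = {
--     'l': ('login',),
--     'r': ('register',),
--     's': ('signup', 'search'),
--     'p': ('privacy',),
--     't': ('terms', 'tel:'),
--     'c': ('contact',),
--     'a': ('about',),
--     '.': ('.pdf', '.jpg', '.png'),
--     'm': ('mailto:',),
--     '#': ('#',),
--     'j': ('javascript:',),
-- }
--
--
-- def _is_valid_article_url(url: str, domain: str) -> bool:
--     """Check if URL is valid for scraping"""
--     if not url or domain not in url:
--         return False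
--     u = url.lower()
--     for i, ch in enumerate(u):
--         for p in _DISPATCH.get(ch, ()):
--             if u.startswith(p, i):
--                 return False
--     return True
-- ===== Notes on version B (the rewrite author's own statement) =====
-- stated objective: alternative
-- what changed: A's pattern-major loop of 15 independent substring searches is replaced by a single left-to-right scan of the lowered URL with a first-character dispatch table: at each position only the (at most 3) patterns starting with that character are tested as prefixes.
import Mathlib
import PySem

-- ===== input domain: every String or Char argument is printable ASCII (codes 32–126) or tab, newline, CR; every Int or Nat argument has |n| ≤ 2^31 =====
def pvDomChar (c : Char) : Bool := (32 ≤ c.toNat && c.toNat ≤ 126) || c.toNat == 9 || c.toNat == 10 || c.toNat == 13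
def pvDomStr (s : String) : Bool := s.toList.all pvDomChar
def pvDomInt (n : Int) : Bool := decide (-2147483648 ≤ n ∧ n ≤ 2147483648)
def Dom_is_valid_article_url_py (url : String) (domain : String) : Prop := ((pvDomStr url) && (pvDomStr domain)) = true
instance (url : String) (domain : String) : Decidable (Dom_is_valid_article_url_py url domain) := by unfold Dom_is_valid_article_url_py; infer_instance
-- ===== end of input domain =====

-- B replaces A's pattern-major loop of 15 substring searches by one scan of the lowered URL with a first-character dispatch table (alternative decomposition, same cost class).


-- ===== PORT A =====
-- A iterates over the skip patterns, testing each as a substring of the lowered URL.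
def pvSkipPatterns : List String :=
  ["login", "register", "signup", "privacy", "terms",
   "contact", "about", "search", ".pdf", ".jpg", ".png",
   "mailto:", "tel:", "#", "javascript:"]

def is_valid_article_url_py (url : String) (domain : String) : Bool :=
  if url = "" || !(PySem.Str.isIn domain url) then false
  else
    let url_lower := PySem.Str.lower url
    -- for pattern in skip_patterns: if pattern in url_lower: return False
    if pvSkipPatterns.any (fun pattern => PySem.Str.isIn pattern url_lower) then false
    else true

-- ===== PORT B =====
-- _DISPATCH.get(ch, ()): the skip patterns that begin with character ch.
def pvDispatch (ch : Char) : List (List Char) :=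
  if ch = 'l' then [['l','o','g','i','n']]
  else if ch = 'r' then [['r','e','g','i','s','t','e','r']]
  else if ch = 's' then [['s','i','g','n','u','p'], ['s','e','a','r','c','h']]
  else if ch = 'p' then [['p','r','i','v','a','c','y']]
  else if ch = 't' then [['t','e','r','m','s'], ['t','e','l',':']]
  else if ch = 'c' then [['c','o','n','t','a','c','t']]
  else if ch = 'a' then [['a','b','o','u','t']]
  else if ch = '.' then [['.','p','d','f'], ['.','j','p','g'], ['.','p','n','g']]
  else if ch = 'm' then [['m','a','i','l','t','o',':']]
  else if ch = '#' then [['#']]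
  else if ch = 'j' then [['j','a','v','a','s','c','r','i','p','t',':']]
  else []

-- the 'for i, ch in enumerate(u)' loop: scan the suffixes of u; u.startswith(p, i)
-- is a prefix test on the suffix beginning at i.
def pvScan : List Char → Bool
  | [] => true
  | ch :: rest =>
      if (pvDispatch ch).any (fun p => PySem.Chars.startswith (ch :: rest) p) then false
      else pvScan rest

def is_valid_article_url_py_alt (url : String) (domain : String) : Bool :=
  if url = "" || !(PySem.Str.isIn domain url) then false
  else pvScan (PySem.Chars.lower url.toList)

-- ===== PRECONDITION & SPEC =====
def Spec_is_valid_article_url_py (url : String) (domain : String) (out : Bool) : Prop := out = is_valid_article_url_py_alt url domain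
instance (url : String) (domain : String) (out : Bool) : Decidable (Spec_is_valid_article_url_py url domain out) := by unfold Spec_is_valid_article_url_py; infer_instance

-- ===== CLAIM (what is proved, stated in full; the proofs are below) =====
def Claim_equal_is_valid_article_url_py : Prop := ∀ (url : String) (domain : String), Dom_is_valid_article_url_py url domain → Spec_is_valid_article_url_py url domain (is_valid_article_url_py url domain)

-- ===== LEMMAS AND PROOFS =====

-- the skip patterns as character lists
def pvPatternsL : List (List Char) :=
  [['l','o','g','i','n'], ['r','e','g','i','s','t','e','r'], ['s','i','g','n','u','p'],
   ['p','r','i','v','a','c','y'], ['t','e','r','m','s'], ['c','o','n','t','a','c','t'],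
   ['a','b','o','u','t'], ['s','e','a','r','c','h'], ['.','p','d','f'], ['.','j','p','g'],
   ['.','p','n','g'], ['m','a','i','l','t','o',':'], ['t','e','l',':'], ['#'],
   ['j','a','v','a','s','c','r','i','p','t',':']]

theorem pvPatternsL_eq : pvSkipPatterns.map String.toList = pvPatternsL := by decide

-- every dispatch bucket holds only skip patterns
set_option maxHeartbeats 1000000 in
theorem pvDispatch_sub (ch : Char) (p : List Char) (h : p ∈ pvDispatch ch) :
    p ∈ pvSkipPatterns.map String.toList := by
  rw [pvPatternsL_eq]
  unfold pvDispatch at h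
  split_ifs at h <;>
    simp only [List.mem_cons, List.not_mem_nil, or_false] at h
  all_goals try (rcases h with rfl | rfl | rfl)
  all_goals decide

-- a skip pattern that is a prefix of ch :: rest lies in ch's dispatch bucket
theorem pvDispatch_complete (ch : Char) (rest p : List Char)
    (hp : p ∈ pvSkipPatterns.map String.toList)
    (hs : PySem.Chars.startswith (ch :: rest) p = true) : p ∈ pvDispatch ch := by
  rw [PySem.Chars.startswith_iff] at hs
  rw [pvPatternsL_eq] at hp
  fin_cases hp <;>
    · obtain ⟨t, ht⟩ := hs
      simp only [List.cons_append] at ht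
      injection ht with h1 _
      simp [pvDispatch, ← h1]

-- 'sub in u' splits at the head of u into a prefix test plus 'sub in tail'
theorem pvIsIn_cons (p : List Char) (ch : Char) (rest : List Char) :
    PySem.Chars.isIn p (ch :: rest)
      = (PySem.Chars.startswith (ch :: rest) p || PySem.Chars.isIn p rest) := by
  rw [Bool.eq_iff_iff]
  simp only [Bool.or_eq_true, PySem.Chars.startswith_iff,
    ← PySem.Chars.exists_prefix_drop_iff_isIn]
  constructor
  · rintro ⟨j, hj⟩
    cases j with
    | zero => exact Or.inl hj
    | succ k => exact Or.inr ⟨k, hj⟩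
  · rintro (h | ⟨k, hk⟩)
    · exact ⟨0, h⟩
    · exact ⟨k + 1, hk⟩

-- the scan returns true exactly when no skip pattern occurs in u
theorem pvScan_eq (u : List Char) :
    pvScan u = !(pvSkipPatterns.any fun pattern => PySem.Chars.isIn pattern.toList u) := by
  induction u with
  | nil => decide
  | cons ch rest ih =>
    rw [pvScan]
    by_cases hhit : (pvDispatch ch).any (fun p => PySem.Chars.startswith (ch :: rest) p) = true
    · rw [if_pos hhit]
      obtain ⟨p, hp, hs⟩ := List.any_eq_true.mp hhit
      have hmem := pvDispatch_sub ch p hp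
      obtain ⟨q, hq, rfl⟩ := List.mem_map.mp hmem
      symm
      simp only [Bool.not_eq_eq_eq_not, Bool.not_false, List.any_eq_true]
      exact ⟨q, hq, by rw [pvIsIn_cons, hs, Bool.true_or]⟩
    · rw [if_neg hhit, ih]
      congr 1
      rw [Bool.eq_iff_iff]
      simp only [List.any_eq_true]
      constructor
      · rintro ⟨q, hq, hin⟩
        exact ⟨q, hq, by rw [pvIsIn_cons, hin, Bool.or_true]⟩
      · rintro ⟨q, hq, hin⟩
        refine ⟨q, hq, ?_⟩
        rw [pvIsIn_cons] at hin
        simp only [Bool.or_eq_true] at hin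
        rcases hin with hs | ht
        · exact absurd (List.any_eq_true.mpr
            ⟨q.toList, pvDispatch_complete ch rest q.toList (List.mem_map_of_mem hq) hs, hs⟩) hhit
        · exact ht

-- ===== VERDICT (by name: the statement is the Claim_ definition above) =====
theorem is_valid_article_url_py_spec : Claim_equal_is_valid_article_url_py := by
  intro url domain _
  unfold Spec_is_valid_article_url_py is_valid_article_url_py is_valid_article_url_py_alt
  by_cases hg : (url = "" || !(PySem.Str.isIn domain url)) = true
  · rw [if_pos hg, if_pos hg]
  · rw [if_neg hg, if_neg hg, pvScan_eq]
    have hA : (pvSkipPatterns.any fun pattern => PySem.Chars.isIn pattern.toList (PySem.Chars.lower url.toList))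
        = (pvSkipPatterns.any fun pattern => PySem.Str.isIn pattern (PySem.Str.lower url)) := by
      simp [PySem.Str.isIn, PySem.Str.toList_lower]
    rw [hA]
    show (if (pvSkipPatterns.any fun pattern => PySem.Str.isIn pattern (PySem.Str.lower url)) = true then false else true)
        = !pvSkipPatterns.any fun pattern => PySem.Str.isIn pattern (PySem.Str.lower url)
    split_ifs with h
    · rw [h]; rfl
    · rw [Bool.not_eq_true] at h
      rw [h]; rfl
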